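-- pv_equiv track=rewrite | github.com/paul-heyse/CodeIntel | src/codeintel/analytics/data_model_usage.py | _usage_for_attr
-- ===== SOURCE A (Python) =====
-- ORM_CREATE_METHODS = {"create", "add", "merge", "bulk_create"}
--
-- ORM_READ_METHODS = {
--     "get",
--     "filter",
--     "filter_by",
--     "all",
--     "first",
--     "one",
--     "one_or_none",
--     "scalar_one",
--     "scalar_one_or_none",
--     "query",
--     "select",
--     "join",
--     "where",
-- }
--
-- ORM_UPDATE_METHODS = {"update", "save", "commit", "refresh", "refresh_from_db"}
--
-- ORM_DELETE_METHODS = {"delete", "remove"}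
--
-- ORM_SERIALIZE_METHODS = {
--     "dict",
--     "json",
--     "model_dump",
--     "model_dump_json",
--     "asdict",
--     "astuple",
--     "values",
--     "values_list",
--     "to_dict",
-- }
--
-- ORM_VALIDATE_METHODS = {"validate", "model_validate", "full_clean"}
--
-- def _usage_for_attr(attr_name: str) -> str | None:
--     buckets = [
--         ("serialize", ORM_SERIALIZE_METHODS),
--         ("update", ORM_UPDATE_METHODS),
--         ("validate", ORM_VALIDATE_METHODS),
--         ("delete", ORM_DELETE_METHODS),
--         ("read", ORM_READ_METHODS),
--         ("create", ORM_CREATE_METHODS),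
--     ]
--     for kind, group in buckets:
--         if attr_name in group:
--             return kind
--     return None
-- ===== SOURCE B (Python) =====
-- ORM_CREATE_METHODS = {"create", "add", "merge", "bulk_create"}
--
-- ORM_READ_METHODS = {
--     "get",
--     "filter",
--     "filter_by",
--     "all",
--     "first",
--     "one",
--     "one_or_none",
--     "scalar_one",
--     "scalar_one_or_none",
--     "query",
--     "select",
--     "join",
--     "where",
-- }
--
-- ORM_UPDATE_METHODS = {"update", "save", "commit", "refresh", "refresh_from_db"}
--
-- ORM_DELETE_METHODS = {"delete", "remove"}
--
-- ORM_SERIALIZE_METHODS = {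
--     "dict",
--     "json",
--     "model_dump",
--     "model_dump_json",
--     "asdict",
--     "astuple",
--     "values",
--     "values_list",
--     "to_dict",
-- }
--
-- ORM_VALIDATE_METHODS = {"validate", "model_validate", "full_clean"}
--
-- # One flat lookup table, built once; buckets listed in reverse priority so that
-- # on any (hypothetical) collision the higher-priority kind overwrites.
-- METHOD_TO_KIND = {
--     method: kind
--     for kind, group in (
--         ("create", ORM_CREATE_METHODS),
--         ("read", ORM_READ_METHODS),
--         ("delete", ORM_DELETE_METHODS),
--         ("validate", ORM_VALIDATE_METHODS),
--         ("update", ORM_UPDATE_METHODS),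
--         ("serialize", ORM_SERIALIZE_METHODS),
--     )
--     for method in group
-- }
--
--
-- def _usage_for_attr(attr_name: str) -> str | None:
--     return METHOD_TO_KIND.get(attr_name)
-- ===== Notes on version B (the rewrite author's own statement) =====
-- stated objective: idiomatic
-- what changed: Replaces the ordered six-bucket membership loop with a single flat method->kind dict built once at module level (in reverse-priority insertion order) and a plain dict .get lookup.
import Mathlib
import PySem

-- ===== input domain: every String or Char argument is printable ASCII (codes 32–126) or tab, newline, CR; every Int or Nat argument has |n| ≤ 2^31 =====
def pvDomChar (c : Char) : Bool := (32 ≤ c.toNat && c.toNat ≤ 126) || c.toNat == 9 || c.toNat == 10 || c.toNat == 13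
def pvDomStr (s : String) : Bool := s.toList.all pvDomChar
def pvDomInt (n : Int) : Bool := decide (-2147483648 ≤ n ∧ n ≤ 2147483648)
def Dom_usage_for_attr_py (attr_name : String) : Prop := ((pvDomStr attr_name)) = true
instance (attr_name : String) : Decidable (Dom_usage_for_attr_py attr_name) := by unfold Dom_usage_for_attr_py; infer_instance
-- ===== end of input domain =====

-- B replaces A's ordered six-bucket membership loop by one flat method→kind dict built
-- once (reverse-priority insertion order) and a single dict lookup (objective: idiomatic).

-- ===== PORT A =====
def ORM_CREATE_METHODS : PySem.Set String :=
  PySem.Set.ofList ["create", "add", "merge", "bulk_create"]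
def ORM_READ_METHODS : PySem.Set String :=
  PySem.Set.ofList ["get", "filter", "filter_by", "all", "first", "one", "one_or_none",
    "scalar_one", "scalar_one_or_none", "query", "select", "join", "where"]
def ORM_UPDATE_METHODS : PySem.Set String :=
  PySem.Set.ofList ["update", "save", "commit", "refresh", "refresh_from_db"]
def ORM_DELETE_METHODS : PySem.Set String :=
  PySem.Set.ofList ["delete", "remove"]
def ORM_SERIALIZE_METHODS : PySem.Set String :=
  PySem.Set.ofList ["dict", "json", "model_dump", "model_dump_json", "asdict", "astuple",
    "values", "values_list", "to_dict"]
def ORM_VALIDATE_METHODS : PySem.Set String :=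
  PySem.Set.ofList ["validate", "model_validate", "full_clean"]

def usage_for_attr_py (attr_name : String) : Option String :=
  let buckets : List (String × PySem.Set String) :=
    [("serialize", ORM_SERIALIZE_METHODS),
     ("update", ORM_UPDATE_METHODS),
     ("validate", ORM_VALIDATE_METHODS),
     ("delete", ORM_DELETE_METHODS),
     ("read", ORM_READ_METHODS),
     ("create", ORM_CREATE_METHODS)]
  -- 'for kind, group in buckets: if attr_name in group: return kind' / 'return None'
  buckets.findSome? (fun kg => if PySem.Set.contains kg.2 attr_name then some kg.1 else none)

-- ===== PORT B =====
-- dict comprehension over the reverse-priority bucket tuple; within a group all keys are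
-- distinct, so the dict built is independent of the (unmodelled) set iteration order
def METHOD_TO_KIND : PySem.Dict String String :=
  [("create", ORM_CREATE_METHODS),
   ("read", ORM_READ_METHODS),
   ("delete", ORM_DELETE_METHODS),
   ("validate", ORM_VALIDATE_METHODS),
   ("update", ORM_UPDATE_METHODS),
   ("serialize", ORM_SERIALIZE_METHODS)].foldl
    (fun d kg => kg.2.foldl (fun d m => d.insert m kg.1) d) PySem.Dict.empty

def usage_for_attr_py_alt (attr_name : String) : Option String :=
  PySem.Dict.get? METHOD_TO_KIND attr_name

-- ===== PRECONDITION & SPEC =====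
def Spec_usage_for_attr_py (attr_name : String) (out : Option String) : Prop := out = usage_for_attr_py_alt attr_name
instance (attr_name : String) (out : Option String) : Decidable (Spec_usage_for_attr_py attr_name out) := by unfold Spec_usage_for_attr_py; infer_instance

-- ===== CLAIM (what is proved, stated in full; the proofs are below) =====
def Claim_equal_usage_for_attr_py : Prop := ∀ (attr_name : String), Dom_usage_for_attr_py attr_name → Spec_usage_for_attr_py attr_name (usage_for_attr_py attr_name)

-- ===== LEMMAS AND PROOFS =====
-- all method names occurring in any bucket
def pvAllKeys : List String :=
  ORM_SERIALIZE_METHODS ++ ORM_UPDATE_METHODS ++ ORM_VALIDATE_METHODS ++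
  ORM_DELETE_METHODS ++ ORM_READ_METHODS ++ ORM_CREATE_METHODS

set_option maxRecDepth 8192 in
theorem pv_known (s : String) (h : s ∈ pvAllKeys) :
    usage_for_attr_py s = usage_for_attr_py_alt s := by
  fin_cases h <;> rfl

set_option maxRecDepth 8192 in
theorem pv_unknown (s : String) (h : s ∉ pvAllKeys) :
    usage_for_attr_py s = usage_for_attr_py_alt s := by
  simp only [pvAllKeys, List.mem_append] at h
  push Not at h
  obtain ⟨⟨⟨⟨⟨h1, h2⟩, h3⟩, h4⟩, h5⟩, h6⟩ := h
  have hA : usage_for_attr_py s = none := by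
    simp only [usage_for_attr_py, List.findSome?]
    rw [if_neg, if_neg, if_neg, if_neg, if_neg, if_neg] <;>
      simp [*]
  have hB : usage_for_attr_py_alt s = none := by
    rw [usage_for_attr_py_alt, PySem.Dict.get?_eq_none_iff_not_mem_keys]
    intro hmem
    -- keys of the literal dict form a concrete list; decide membership case by case
    have hk : METHOD_TO_KIND.keys =
        (ORM_CREATE_METHODS ++ ORM_READ_METHODS ++ ORM_DELETE_METHODS ++
         ORM_VALIDATE_METHODS ++ ORM_UPDATE_METHODS ++ ORM_SERIALIZE_METHODS : List String) := by
      decide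
    rw [hk] at hmem
    simp only [List.mem_append] at hmem
    rcases hmem with ((((hm | hm) | hm) | hm) | hm) | hm <;>
      first
        | exact absurd hm h1 | exact absurd hm h2 | exact absurd hm h3
        | exact absurd hm h4 | exact absurd hm h5 | exact absurd hm h6
  rw [hA, hB]

-- ===== VERDICT (by name: the statement is the Claim_ definition above) =====
theorem usage_for_attr_py_spec : Claim_equal_usage_for_attr_py := by
  intro s _
  unfold Spec_usage_for_attr_py
  by_cases h : s ∈ pvAllKeys
  · exact pv_known s h
  · exact pv_unknown s h
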